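-- pv_equiv track=rewrite | github.com/ndombrowski20/cayley_graphs | ANNs/project/monkeying_around.py | check_week
-- ===== SOURCE A (Python) =====
-- def check_week(a_list):
--     if len(a_list) >= 6:
--         raise Exception("we're only looking for 5 day weeks bruhv")
--     init = str(a_list[0])[-1]
--     for i in range(len(a_list)):
--         current = str(a_list[i])[-1]
--         if int(current) != int(init)+ i:
--             return False
--     return True
-- ===== SOURCE B (Python) =====
-- def check_week(a_list):
--     if len(a_list) >= 6:
--         raise Exception("we're only looking for 5 day weeks bruhv")
--     return all(abs(b) % 10 - abs(a) % 10 == 1 for a, b in zip(a_list, a_list[1:]))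
-- ===== Notes on version B (the rewrite author's own statement) =====
-- stated objective: alternative
-- what changed: Computes last digits arithmetically as abs(x) mod 10 (no string conversion) and checks that each adjacent pair of digits differs by exactly 1 by zipping the list with its own tail, instead of A's indexed loop that re-extracts the last character of str(x) and compares each digit against the first digit plus its offset.
import Mathlib
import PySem

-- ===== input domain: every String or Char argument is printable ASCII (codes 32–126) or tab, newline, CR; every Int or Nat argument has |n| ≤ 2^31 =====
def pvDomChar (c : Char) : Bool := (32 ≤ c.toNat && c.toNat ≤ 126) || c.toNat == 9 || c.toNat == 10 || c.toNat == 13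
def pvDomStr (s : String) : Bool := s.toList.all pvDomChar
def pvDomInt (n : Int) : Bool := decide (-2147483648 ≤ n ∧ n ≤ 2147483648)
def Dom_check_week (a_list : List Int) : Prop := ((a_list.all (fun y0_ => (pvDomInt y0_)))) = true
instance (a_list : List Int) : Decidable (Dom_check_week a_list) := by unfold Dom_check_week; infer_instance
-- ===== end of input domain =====

-- B computes last digits arithmetically (abs(x) mod 10, no string conversion) and checks
-- adjacent digit differences by zipping the list with its tail; A re-extracts the last
-- character of str(x) in an indexed loop against the first digit plus offset (alternative).


-- ===== PORT A =====
-- int of the last character of str(x)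
def pyLastDigit (x : Int) : Int :=
  (((PySem.Str.pyGet? (PySem.Int.toStr x) (-1)).bind
      (fun c => PySem.Int.ofChars? [c])).getD 0)

-- the 'for i in range(len(a_list))' loop with its early 'return False'
def check_week_loop (init : Int) : List Int → Int → Bool
  | [], _ => true
  | x :: xs, i => if pyLastDigit x ≠ init + i then false else check_week_loop init xs (i + 1)

def check_week (a_list : List Int) : Bool :=
  if 6 ≤ a_list.length then false     -- Python raises Exception here; excluded by Pre_
  else match PySem.List.pyGet? a_list 0 with
  | none => false                     -- Python raises IndexError here; excluded by Pre_
  | some a0 => check_week_loop (pyLastDigit a0) a_list 0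

-- ===== PORT B =====
def check_week_alt (a_list : List Int) : Bool :=
  if 6 ≤ a_list.length then false     -- Python raises Exception here; excluded by Pre_
  else (a_list.zip (PySem.List.slice a_list (some 1) none)).all
    (fun p => PySem.Int.mod (p.2.natAbs : Int) 10 - PySem.Int.mod (p.1.natAbs : Int) 10 == 1)

-- ===== PRECONDITION & SPEC =====
-- Pre_ excludes the empty list (A raises IndexError on a_list[0]) and lists of
-- length ≥ 6 (both raise Exception("we're only looking for 5 day weeks bruhv")).
def Pre_check_week (a_list : List Int) : Prop := a_list ≠ [] ∧ a_list.length ≤ 5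
instance (a_list : List Int) : Decidable (Pre_check_week a_list) := by unfold Pre_check_week; infer_instance
def pvWitness_check_week : List Int := ([5, 6, 7])

def Spec_check_week (a_list : List Int) (out : Bool) : Prop := out = check_week_alt a_list
instance (a_list : List Int) (out : Bool) : Decidable (Spec_check_week a_list out) := by unfold Spec_check_week; infer_instance

-- ===== CLAIM (what is proved, stated in full; the proofs are below) =====
def Claim_equal_check_week : Prop := ∀ (a_list : List Int), Dom_check_week a_list → Pre_check_week a_list → Spec_check_week a_list (check_week a_list)

-- ===== LEMMAS AND PROOFS =====

-- Nat.toDigitsCore only prepends to its accumulator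
lemma toDigitsCore_append (f : Nat) : ∀ (n : Nat) (ds : List Char),
    Nat.toDigitsCore 10 f n ds = Nat.toDigitsCore 10 f n [] ++ ds := by
  induction f with
  | zero => intro n ds; simp [Nat.toDigitsCore]
  | succ f ih =>
    intro n ds
    simp only [Nat.toDigitsCore]
    by_cases h : n / 10 = 0
    · simp [h]
    · simp only [h, if_false]
      rw [ih (n / 10) ((n % 10).digitChar :: ds), ih (n / 10) [(n % 10).digitChar]]
      simp

-- with positive fuel the first char pushed is digitChar (n % 10), so it ends the list
lemma toDigitsCore_concat (f n : Nat) (hf : 0 < f) :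
    ∃ l, Nat.toDigitsCore 10 f n [] = l ++ [(n % 10).digitChar] := by
  match f, hf with
  | f + 1, _ =>
    simp only [Nat.toDigitsCore]
    by_cases h : n / 10 = 0
    · exact ⟨[], by simp [h]⟩
    · refine ⟨Nat.toDigitsCore 10 f (n / 10) [], ?_⟩
      simp only [h, if_false]
      exact toDigitsCore_append f (n / 10) [(n % 10).digitChar]

lemma toChars_getLast (x : Int) :
    (PySem.Int.toChars x).getLast? = some ((x.natAbs % 10).digitChar) := by
  unfold PySem.Int.toChars Nat.toDigits
  split
  · obtain ⟨l, hl⟩ := toDigitsCore_concat (x.natAbs + 1) x.natAbs (Nat.succ_pos _)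
    rw [hl, show '-' :: (l ++ [(x.natAbs % 10).digitChar]) = ('-' :: l) ++ [(x.natAbs % 10).digitChar] from rfl,
        List.getLast?_concat]
  · have hx : x.toNat = x.natAbs := by omega
    obtain ⟨l, hl⟩ := toDigitsCore_concat (x.toNat + 1) x.toNat (Nat.succ_pos _)
    rw [hl, List.getLast?_concat, hx]

lemma ofChars_digitChar (d : Nat) (hd : d < 10) :
    PySem.Int.ofChars? [d.digitChar] = some (d : Int) := by
  interval_cases d <;> decide

-- int of the last character of str(x) is |x| % 10
lemma pyLastDigit_eq (x : Int) : pyLastDigit x = ((x.natAbs % 10 : Nat) : Int) := by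
  unfold pyLastDigit
  rw [show PySem.Str.pyGet? (PySem.Int.toStr x) (-1)
        = PySem.Chars.pyGet? (PySem.Int.toStr x).toList (-1) from rfl,
      PySem.Int.toList_toStr]
  simp only [PySem.Chars.pyGet?_eq_listPyGet?, PySem.List.pyGet?_neg_one, toChars_getLast,
    Option.bind_some, ofChars_digitChar (x.natAbs % 10) (Nat.mod_lt _ (by norm_num))]
  rfl

-- A's loop compared against the consecutive range (A's global-offset view)
lemma check_week_loop_eq (init : Int) (xs : List Int) (i : Int) :
    check_week_loop init xs i
      = (xs.map pyLastDigit == PySem.List.pyRange (init + i) (init + i + xs.length) 1) := by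
  induction xs generalizing i with
  | nil =>
    simp [check_week_loop, PySem.List.pyRange_one_eq_nil (le_refl _)]
  | cons x xs ih =>
    have hlt : init + i < init + i + ((x :: xs).length : Int) := by simp
    rw [check_week_loop, List.map_cons, PySem.List.pyRange_one_cons hlt]
    have h1 : init + i + ((x :: xs).length : Int) = init + i + 1 + (xs.length : Int) := by
      simp [List.length_cons]; ring
    have h2 : init + i + 1 = init + (i + 1) := by ring
    rw [h1, h2, ih (i + 1)]
    by_cases h : pyLastDigit x = init + i
    · simp [h]
    · simp [h]

-- being the consecutive range from the head = all adjacent differences are 1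
lemma range_eq_chain (t : List Int) : ∀ (a : Int),
    ((a :: t) == PySem.List.pyRange a (a + ((t.length : Int) + 1)) 1)
      = ((a :: t).zip t).all (fun p => p.2 - p.1 == 1) := by
  induction t with
  | nil =>
    intro a
    rw [PySem.List.pyRange_one_cons (by omega)]
    simp [PySem.List.pyRange_one_eq_nil (le_refl _)]
  | cons b t ih =>
    intro a
    rw [PySem.List.pyRange_one_cons (by simp; omega)]
    by_cases hb : b = a + 1
    · have harg : a + ((((b :: t).length : Nat) : Int) + 1) = (a + 1) + ((t.length : Int) + 1) := by
        simp [List.length_cons]; ring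
      rw [harg, ← hb]
      have := ih b
      simp only [List.cons_beq_cons, BEq.rfl, Bool.true_and] at *
      rw [this]
      simp [hb, List.zip_cons_cons]
    · -- head mismatch: both sides are false
      have hlen : (a + 1 : Int) < a + ((((b :: t).length : Nat) : Int) + 1) := by
        simp [List.length_cons]
      rw [PySem.List.pyRange_one_cons hlen]
      have hbfalse : ((b == a + 1) : Bool) = false := by
        rw [beq_eq_false_iff_ne]; exact hb
      have hdfalse : ((b - a == 1) : Bool) = false := by
        rw [beq_eq_false_iff_ne]; omega
      simp [List.cons_beq_cons, List.zip_cons_cons, hbfalse, hdfalse]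

-- B's per-element arithmetic digit equals A's string-extracted digit, pair by pair
lemma zip_mod_eq_zip_lastDigit (l : List Int) :
    (l.zip l.tail).all
        (fun p => PySem.Int.mod ((p.2.natAbs : Nat) : Int) 10
          - PySem.Int.mod ((p.1.natAbs : Nat) : Int) 10 == 1)
      = ((l.map pyLastDigit).zip ((l.map pyLastDigit).tail)).all (fun p => p.2 - p.1 == 1) := by
  have hmod : ∀ x : Int, PySem.Int.mod ((x.natAbs : Nat) : Int) 10 = pyLastDigit x := by
    intro x
    rw [pyLastDigit_eq, PySem.Int.mod_eq_emod_of_pos (by norm_num)]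
    omega
  induction l with
  | nil => rfl
  | cons a l ih =>
    cases l with
    | nil => rfl
    | cons b t =>
      simp only [List.map_cons, List.tail_cons, List.zip_cons_cons, List.all_cons] at *
      rw [ih, hmod, hmod]

-- ===== VERDICT (by name: the statement is the Claim_ definition above) =====
theorem check_week_spec : Claim_equal_check_week := by
  intro a_list _ hpre
  unfold Spec_check_week
  obtain ⟨hne, hlen⟩ := hpre
  match a_list, hne with
  | a0 :: rest, _ =>
    have hg : ¬ (6 ≤ (a0 :: rest).length) := by omega
    simp only [check_week, check_week_alt, hg, if_false, PySem.List.pyGet?_zero_cons]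
    rw [check_week_loop_eq]
    rw [PySem.List.slice_from_one]
    rw [zip_mod_eq_zip_lastDigit]
    have harg : pyLastDigit a0 + 0 + (((a0 :: rest).length : Nat) : Int)
        = pyLastDigit a0 + (((rest.map pyLastDigit).length : Nat) : Int) + 1 := by
      simp [List.length_cons]; ring
    have hzero : pyLastDigit a0 + 0 = pyLastDigit a0 := by ring
    rw [harg, hzero]
    have := range_eq_chain (rest.map pyLastDigit) (pyLastDigit a0)
    simp only [List.map_cons, List.tail_cons] at *
    rw [← this]
    ring_nf
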